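-- pv_equiv track=rewrite | github.com/AdamZhouSE/pythonHomework | Code/CodeRecords/2560/60839/283186.py | func
-- ===== SOURCE A (Python) =====
-- def func(n,lis,m):
--     set1=set(lis)
--     dict={}
--     for item in set1:
--         dict.update({item:lis.count(item)})
--     list1=list(dict.values())
--     list1.sort()##从小到大
--     x=m
--     while(x>=0):
--         if x>=list1[0]:
--             x=x-list1[0]
--             list1.remove(list1[0])
--         else:
--             x=-1
--     return len(list1)
-- ===== SOURCE B (Python) =====
-- def func(n, lis, m):
--     freq = {}
--     for v in lis:
--         freq[v] = freq.get(v, 0) + 1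
--     counts = sorted(freq.values())
--     x = m
--     removed = 0
--     for c in counts:
--         if x < c:
--             break
--         x -= c
--         removed += 1
--     return len(counts) - removed
-- ===== Notes on version B (the rewrite author's own statement) =====
-- stated objective: faster
-- what changed: B counts frequencies in one dict pass (instead of lis.count per distinct element) and removes small groups with a single forward scan over the sorted counts (instead of repeated list.remove), returning len - removed.
import Mathlib
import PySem

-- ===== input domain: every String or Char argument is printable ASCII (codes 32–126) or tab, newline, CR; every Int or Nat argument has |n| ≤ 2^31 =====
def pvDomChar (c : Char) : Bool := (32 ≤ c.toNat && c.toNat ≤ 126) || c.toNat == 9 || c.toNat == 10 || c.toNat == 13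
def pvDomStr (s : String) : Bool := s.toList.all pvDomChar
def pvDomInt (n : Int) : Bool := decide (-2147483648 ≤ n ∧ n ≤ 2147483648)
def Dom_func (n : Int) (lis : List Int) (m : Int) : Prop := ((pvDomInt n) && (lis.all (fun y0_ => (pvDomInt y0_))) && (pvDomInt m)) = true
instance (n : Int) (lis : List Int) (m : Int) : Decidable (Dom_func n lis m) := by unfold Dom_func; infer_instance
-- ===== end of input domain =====

-- B replaces A's per-element lis.count and repeated list.remove with one counting pass and one
-- forward scan over the sorted counts (objective: faster). Return-value equivalence only: A also
-- mutates no argument, so there is no observable side-effect difference.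

-- ===== PORT A =====
-- the while-loop of A: x ≥ 0 test, compare with the head (list1[0]), remove the head;
-- on the empty list with x ≥ 0 Python raises IndexError (excluded by Pre_func); we return 0 there
def funcLoopA (x : Int) (l : List Int) : Int :=
  match l with
  | [] => 0
  | c :: rest =>
      if x ≥ 0 then
        if x ≥ c then funcLoopA (x - c) rest else ((c :: rest).length : Int)
      else ((c :: rest).length : Int)

def func (n : Int) (lis : List Int) (m : Int) : Int :=
  let set1 := PySem.Set.ofList lis
  let d := set1.foldl (fun d item => d.insert item ((PySem.List.count lis item : Int))) PySem.Dict.empty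
  let list1 := PySem.List.sorted (PySem.Dict.values d) (fun v => v) false
  funcLoopA m list1

-- ===== PORT B =====
-- the for-loop of B: scan the sorted counts, stop (break) at the first count exceeding x
def funcLoopB (x : Int) (removed : Int) (l : List Int) : Int :=
  match l with
  | [] => removed
  | c :: rest => if x < c then removed else funcLoopB (x - c) (removed + 1) rest

def func_alt (n : Int) (lis : List Int) (m : Int) : Int :=
  let freq := lis.foldl (fun d v => d.insert v (d.getD v 0 + 1)) PySem.Dict.empty
  let counts := PySem.List.sorted (PySem.Dict.values freq) (fun v => v) false
  (counts.length : Int) - funcLoopB m 0 counts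

-- ===== PRECONDITION & SPEC =====
-- Pre_func excludes exactly the inputs (m ≥ len(lis)) on which A's while-loop empties the
-- list and then evaluates list1[0], raising IndexError; B returns 0 (no groups remain) there.
def Pre_func (n : Int) (lis : List Int) (m : Int) : Prop := m < (lis.length : Int)
instance (n : Int) (lis : List Int) (m : Int) : Decidable (Pre_func n lis m) := by unfold Pre_func; infer_instance
def pvWitness_func : Int × List Int × Int := (0, [1, 1, 2], 1)

def Spec_func (n : Int) (lis : List Int) (m : Int) (out : Int) : Prop := out = func_alt n lis m
instance (n : Int) (lis : List Int) (m : Int) (out : Int) : Decidable (Spec_func n lis m out) := by unfold Spec_func; infer_instance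

-- ===== CLAIM (what is proved, stated in full; the proofs are below) =====
def Claim_equal_func : Prop := ∀ (n : Int) (lis : List Int) (m : Int), Dom_func n lis m → Pre_func n lis m → Spec_func n lis m (func n lis m)

-- ===== LEMMAS AND PROOFS =====

-- both programs build the same dict: keys in first-occurrence order, value = multiplicity
theorem values_eq (lis : List Int) :
    PySem.Dict.values ((PySem.Set.ofList lis).foldl (fun d item => d.insert item ((PySem.List.count lis item : Int))) PySem.Dict.empty)
      = PySem.Dict.values (lis.foldl (fun d v => d.insert v (d.getD v 0 + 1)) PySem.Dict.empty) := by
  rw [PySem.Dict.foldl_insert_getD_add_one_eq_counter]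
  have hA := PySem.Dict.items_foldl_insert_fresh (PySem.Set.ofList lis) (fun k => k)
      (fun k => ((PySem.List.count lis k : Int))) PySem.Dict.empty
      (by intro a _; exact PySem.Dict.contains_empty a)
      (by simpa using PySem.Set.nodup_ofList lis)
  simp only [PySem.Dict.values, hA, PySem.Dict.items_counter]
  simp [PySem.Dict.empty, PySem.List.count_eq]

-- the multiplicities of the distinct elements of lis sum to its length
theorem sum_counts (lis : List Int) :
    (((PySem.Set.ofList lis).map (fun k => ((PySem.List.count lis k : Int)))).sum) = (lis.length : Int) := by
  have hperm : (PySem.Set.ofList lis).Perm lis.dedup := by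
    rw [List.perm_ext_iff_of_nodup (PySem.Set.nodup_ofList lis) (List.nodup_dedup lis)]
    intro a; simp [PySem.Set.mem_ofList, List.mem_dedup]
  have := (hperm.map (fun k => ((PySem.List.count lis k : Int)))).sum_eq
  rw [this]
  have hn : ((lis.dedup.map (fun k => List.count k lis)).sum) = lis.length :=
    List.sum_map_count_dedup_eq_length lis
  simp only [PySem.List.count_eq]
  calc (lis.dedup.map (fun k => ((List.count k lis : Int)))).sum
      = ((lis.dedup.map (fun k => List.count k lis)).sum : Int) := by
        induction lis.dedup with
        | nil => simp
        | cons h t ih => simp [ih]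
    _ = (lis.length : Int) := by rw [hn]

theorem funcLoopB_acc (l : List Int) : ∀ (x r : Int), funcLoopB x r l = r + funcLoopB x 0 l := by
  induction l with
  | nil => intro x r; simp [funcLoopB]
  | cons c rest ih =>
    intro x r
    simp only [funcLoopB]
    split_ifs with h
    · ring
    · rw [ih (x - c) (r + 1), ih (x - c) (0 + 1)]; ring

theorem loop_eq (l : List Int) : ∀ (x : Int), (∀ c ∈ l, 0 < c) → x < l.sum →
    funcLoopA x l = (l.length : Int) - funcLoopB x 0 l := by
  induction l with
  | nil => intro x _ hx; simp at hx; simp [funcLoopA, funcLoopB]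
  | cons c rest ih =>
    intro x hpos hx
    have hc : 0 < c := hpos c (by simp)
    simp only [funcLoopA, funcLoopB]
    by_cases h0 : x ≥ 0
    · by_cases h1 : x ≥ c
      · have := ih (x - c) (fun d hd => hpos d (by simp [hd])) (by simp at hx; omega)
        rw [if_pos h0, if_pos h1, this, if_neg (by omega : ¬ x < c),
            funcLoopB_acc rest (x - c) (0 + 1)]
        simp only [List.length_cons]
        push_cast
        ring
      · rw [if_pos h0, if_neg h1, if_pos (by omega : x < c)]
        ring
    · rw [if_neg h0, if_pos (by omega : x < c)]
      ring

-- ===== VERDICT (by name: the statement is the Claim_ definition above) =====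
theorem func_spec : Claim_equal_func := by
  intro n lis m _ hpre
  unfold Spec_func func func_alt
  simp only [← values_eq lis]
  set vals := PySem.Dict.values ((PySem.Set.ofList lis).foldl (fun d item => d.insert item ((PySem.List.count lis item : Int))) PySem.Dict.empty) with hvals
  set counts := PySem.List.sorted vals (fun v => v) false with hcounts
  have hperm : counts.Perm vals := PySem.List.sorted_perm vals (fun v => v) false
  have hvals_def : vals = (PySem.Set.ofList lis).map (fun k => ((PySem.List.count lis k : Int))) := by
    rw [hvals]
    have hA := PySem.Dict.items_foldl_insert_fresh (PySem.Set.ofList lis) (fun k => k)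
        (fun k => ((PySem.List.count lis k : Int))) PySem.Dict.empty
        (by intro a _; exact PySem.Dict.contains_empty a)
        (by simpa using PySem.Set.nodup_ofList lis)
    simp only [PySem.Dict.values, hA]
    simp [PySem.Dict.empty, Function.comp]
  have hsum : counts.sum = (lis.length : Int) := by
    rw [hperm.sum_eq, hvals_def, sum_counts]
  have hpos : ∀ c ∈ counts, 0 < c := by
    intro c hc
    have : c ∈ vals := hperm.mem_iff.mp hc
    rw [hvals_def] at this
    obtain ⟨k, hk, rfl⟩ := List.mem_map.mp this
    have hkl : k ∈ lis := (PySem.Set.mem_ofList lis k).mp hk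
    have hcp : 0 < List.count k lis := List.count_pos_iff.mpr hkl
    simp only [PySem.List.count_eq]
    exact_mod_cast hcp
  exact loop_eq counts m hpos (by rw [hsum]; exact hpre)
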